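-- pv_equiv track=rewrite | github.com/Carol773/GeeksForGeeks | Difficulty: Easy/Palindrome Sentence/palindrome-sentence.py | sentencePalindrome
-- ===== SOURCE A (Python) =====
-- def sentencePalindrome(s):
-- 	# your code here
-- 	lst=[]
--
-- 	for ch in s:
-- 	    if ch.isalpha():
-- 	        lst.append(ch)
--
-- 	s=''.join(x for x in lst)
-- 	if s==s[::-1]:
-- 	    return 1
-- 	else:
-- 	    return 0
-- ===== SOURCE B (Python) =====
-- def sentencePalindrome(s):
--     i, j = 0, len(s) - 1
--     while i < j:
--         if not s[i].isalpha():
--             i += 1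
--         elif not s[j].isalpha():
--             j -= 1
--         elif s[i] != s[j]:
--             return 0
--         else:
--             i += 1
--             j -= 1
--     return 1
-- ===== Notes on version B (the rewrite author's own statement) =====
-- stated objective: alternative
-- what changed: Replaces A's filter-into-a-list / join / reversed-slice comparison with an in-place two-pointer scan over the original string that skips non-letters from both ends and compares letters directly, building no intermediate list or string and exiting early on the first mismatch.
import Mathlib
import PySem

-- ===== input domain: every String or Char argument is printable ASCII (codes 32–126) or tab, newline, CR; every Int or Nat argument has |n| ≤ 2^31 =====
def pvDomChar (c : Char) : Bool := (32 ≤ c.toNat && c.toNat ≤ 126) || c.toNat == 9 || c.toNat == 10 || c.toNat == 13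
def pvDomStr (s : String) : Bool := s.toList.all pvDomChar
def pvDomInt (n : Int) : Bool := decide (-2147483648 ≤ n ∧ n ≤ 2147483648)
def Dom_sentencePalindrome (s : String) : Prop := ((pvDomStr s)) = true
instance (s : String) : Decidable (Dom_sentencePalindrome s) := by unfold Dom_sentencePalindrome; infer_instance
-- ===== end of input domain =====

-- B replaces A's filter/join/reversed-slice comparison with an in-place two-pointer scan (alternative; same O(n) time, no intermediate list).

-- ===== PORT A =====
def sentencePalindrome (s : String) : Int :=
  -- lst = []; for ch in s: if ch.isalpha(): lst.append(ch)
  let lst : List Char := s.toList.foldl (fun l ch => if PySem.Chars.isalpha ch then l ++ [ch] else l) []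
  -- s = ''.join(x for x in lst)  (join with '' of single chars is the list itself)
  let s2 : List Char := lst
  -- if s == s[::-1]: return 1 else: return 0
  match PySem.Chars.slice? s2 none none (-1) with
  | some r => if s2 = r then 1 else 0
  | none => 0  -- unreachable: step = -1 ≠ 0

-- ===== PORT B =====
-- while i < j loop of Source B; index accesses are always in range when taken (0 ≤ i < j ≤ len-1),
-- so the getD default is never used.
def twoPtrB (l : List Char) (i j : Int) : Int :=
  if h : i < j then
    let ci := (PySem.List.pyGet? l i).getD ' '
    if !PySem.Chars.isalpha ci then twoPtrB l (i + 1) j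
    else
      let cj := (PySem.List.pyGet? l j).getD ' '
      if !PySem.Chars.isalpha cj then twoPtrB l i (j - 1)
      else if ci ≠ cj then 0
      else twoPtrB l (i + 1) (j - 1)
  else 1
termination_by (j - i).toNat
decreasing_by all_goals omega

def sentencePalindrome_alt (s : String) : Int :=
  twoPtrB s.toList 0 (PySem.Str.len s - 1)

-- ===== PRECONDITION & SPEC =====
def Spec_sentencePalindrome (s : String) (out : Int) : Prop := out = sentencePalindrome_alt s
instance (s : String) (out : Int) : Decidable (Spec_sentencePalindrome s out) := by unfold Spec_sentencePalindrome; infer_instance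

-- ===== CLAIM (what is proved, stated in full; the proofs are below) =====
def Claim_equal_sentencePalindrome : Prop := ∀ (s : String), Dom_sentencePalindrome s → Spec_sentencePalindrome s (sentencePalindrome s)

-- ===== LEMMAS AND PROOFS =====

-- A's accumulating loop is filter
theorem foldl_filter_acc (p : Char → Bool) (l acc : List Char) :
    l.foldl (fun a ch => if p ch then a ++ [ch] else a) acc = acc ++ l.filter p := by
  induction l generalizing acc with
  | nil => simp
  | cons c t ih =>
    simp only [List.foldl_cons, List.filter_cons]
    by_cases h : p c
    · simp [h, ih]
    · simp [h, ih]

theorem pal_sandwich (a : Char) (t : List Char) :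
    (a :: t ++ [a] = (a :: t ++ [a]).reverse) ↔ (t = t.reverse) := by
  simp

theorem pal_sandwich_ne (a b : Char) (t : List Char) (hab : a ≠ b) :
    ¬ (a :: t ++ [b] = (a :: t ++ [b]).reverse) := by
  intro h
  simp only [List.reverse_append, List.reverse_cons, List.reverse_nil, List.nil_append,
    List.cons_append, List.cons.injEq] at h
  exact hab h.1

-- segment l i j = l[i..j] inclusive
def seg (l : List Char) (i j : Nat) : List Char := (l.take (j + 1)).drop i

theorem seg_cons (l : List Char) (i j : Nat) (hij : i ≤ j) (hj : j < l.length) :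
    seg l i j = l[i] :: seg l (i + 1) j := by
  unfold seg
  rw [List.drop_eq_getElem_cons (by simp; omega)]
  simp [List.getElem_take]

theorem seg_concat (l : List Char) (i j : Nat) (hij : i ≤ j) (h1 : 1 ≤ j) (hj : j < l.length) :
    seg l i j = seg l i (j - 1) ++ [l[j]] := by
  unfold seg
  rw [show j - 1 + 1 = j by omega, List.take_add_one]
  rw [List.getElem?_eq_getElem hj]
  simp only [Option.toList_some]
  rw [List.drop_append_of_le_length (by simp; omega)]

theorem seg_short (l : List Char) (i j : Nat) (hij : j ≤ i) (hj : j < l.length) :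
    (seg l i j).length ≤ 1 := by
  unfold seg
  simp only [List.length_drop, List.length_take]
  omega

theorem twoPtrB_base (l : List Char) (i j : Nat) (hij : j ≤ i) (hj : j < l.length) :
    twoPtrB l i j =
      (if (seg l i j).filter PySem.Chars.isalpha = ((seg l i j).filter PySem.Chars.isalpha).reverse
       then 1 else 0) := by
  rw [twoPtrB, dif_neg (by omega)]
  have hlen := seg_short l i j hij hj
  rcases hseg : seg l i j with _ | ⟨a, t⟩
  · simp
  · rcases t with _ | ⟨b, t'⟩
    · by_cases h : PySem.Chars.isalpha a <;> simp [h]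
    · rw [hseg] at hlen; simp at hlen

-- main invariant: the two-pointer loop decides whether the letters of l[i..j] form a palindrome
theorem twoPtrB_key : ∀ (n : Nat) (l : List Char) (i j : Nat), j + 1 - i ≤ n → j < l.length →
    twoPtrB l i j =
      (if (seg l i j).filter PySem.Chars.isalpha = ((seg l i j).filter PySem.Chars.isalpha).reverse
       then 1 else 0) := by
  intro n
  induction n with
  | zero =>
    intro l i j hn hj
    exact twoPtrB_base l i j (by omega) hj
  | succ n ih =>
    intro l i j hn hj
    by_cases hij : i < j
    · -- loop body runs
      have hi : i < l.length := by omega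
      rw [twoPtrB]
      rw [dif_pos (by exact_mod_cast hij)]
      have hgi : PySem.List.pyGet? l (i : Int) = some l[i] := by
        rw [PySem.List.pyGet?_natCast]
        simp [hi]
      have hgj : PySem.List.pyGet? l (j : Int) = some l[j] := by
        rw [PySem.List.pyGet?_natCast]
        simp [hj]
      simp only [hgi, hgj, Option.getD_some]
      rw [seg_cons l i j (by omega) hj]
      by_cases hpa : PySem.Chars.isalpha l[i]
      · rw [if_neg (by simp [hpa])]
        rw [seg_concat l (i + 1) j (by omega) (by omega) hj]
        by_cases hpb : PySem.Chars.isalpha l[j]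
        · rw [if_neg (by simp [hpb])]
          have hfilter : (l[i] :: (seg l (i + 1) (j - 1) ++ [l[j]])).filter PySem.Chars.isalpha
              = l[i] :: ((seg l (i + 1) (j - 1)).filter PySem.Chars.isalpha) ++ [l[j]] := by
            simp [List.filter_append, hpa, hpb]
          by_cases hne : l[i] = l[j]
          · rw [if_neg (by simp [hne])]
            have : ((i : Int) + 1) = ((i + 1 : Nat) : Int) := by push_cast; ring
            rw [this, show ((j : Int) - 1) = ((j - 1 : Nat) : Int) by omega]
            rw [ih l (i + 1) (j - 1) (by omega) (by omega)]
            rw [hfilter, hne]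
            rw [if_congr (pal_sandwich l[j] _) rfl rfl]
          · rw [if_pos (by simp [hne])]
            rw [hfilter]
            rw [if_neg (pal_sandwich_ne _ _ _ hne)]
        · rw [if_pos (by simp [hpb])]
          rw [show ((j : Int) - 1) = ((j - 1 : Nat) : Int) by omega]
          rw [ih l i (j - 1) (by omega) (by omega)]
          rw [seg_cons l i (j - 1) (by omega) (by omega)]
          simp [List.filter_append, hpa, hpb]
      · rw [if_pos (by simp [hpa])]
        rw [show ((i : Int) + 1) = ((i + 1 : Nat) : Int) by push_cast; ring]
        rw [ih l (i + 1) j (by omega) hj]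
        simp [hpa]
    · -- base: same as fuel-zero case
      exact twoPtrB_base l i j (by omega) hj

-- ===== VERDICT (by name: the statement is the Claim_ definition above) =====
theorem sentencePalindrome_spec : Claim_equal_sentencePalindrome := by
  intro s _
  unfold Spec_sentencePalindrome sentencePalindrome sentencePalindrome_alt
  simp only [foldl_filter_acc, List.nil_append, PySem.Chars.slice?_eq_listSlice?,
    PySem.List.slice?_none_none_neg_one, PySem.Str.len_eq]
  rcases hl : s.toList with _ | ⟨c, t⟩
  · rw [twoPtrB, dif_neg (by simp)]
    simp
  · have hlen : (c :: t).length - 1 < (c :: t).length := by simp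
    rw [show ((((c :: t).length : Int)) - 1) = (((c :: t).length - 1 : Nat) : Int) by
      simp only [List.length_cons]; omega]
    have hkey := twoPtrB_key ((c :: t).length) (c :: t) 0 ((c :: t).length - 1) (by omega) hlen
    simp only [Nat.cast_zero] at hkey
    rw [hkey]
    have hseg : seg (c :: t) 0 ((c :: t).length - 1) = c :: t := by
      unfold seg
      rw [show (c :: t).length - 1 + 1 = (c :: t).length by simp]
      simp
    rw [hseg]
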